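-- pv_equiv track=rewrite | github.com/MrBrantCode/unitest_baseline | mut_generate/mist_train_cf/cf_94082/solution.py | find_subsequence_index
-- ===== SOURCE A (Python) =====
-- def find_subsequence_index(string, integer):
--     subsequence = ''.join(sorted(str(integer)))
--     subsequence_index = 0
--     for i in range(len(string)):
--         if string[i] == subsequence[subsequence_index]:
--             subsequence_index += 1
--             if subsequence_index == len(subsequence):
--                 return i - subsequence_index + 1
--     return -1
-- ===== SOURCE B (Python) =====
-- def find_subsequence_index(string, integer):
--     pattern = ''.join(sorted(str(integer)))
--     pos = 0
--     last = -1
--     for ch in pattern: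
--         idx = string.find(ch, pos)
--         if idx == -1:
--             return -1
--         last = idx
--         pos = idx + 1
--     return last - len(pattern) + 1
-- ===== Notes on version B (the rewrite author's own statement) =====
-- stated objective: faster
-- what changed: B is pattern-driven: instead of scanning every character of the string with a pattern pointer and per-character Python-level comparisons, it loops over the sorted digits and jumps with str.find(ch, pos), returning -1 as soon as a digit is missing.
import Mathlib
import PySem

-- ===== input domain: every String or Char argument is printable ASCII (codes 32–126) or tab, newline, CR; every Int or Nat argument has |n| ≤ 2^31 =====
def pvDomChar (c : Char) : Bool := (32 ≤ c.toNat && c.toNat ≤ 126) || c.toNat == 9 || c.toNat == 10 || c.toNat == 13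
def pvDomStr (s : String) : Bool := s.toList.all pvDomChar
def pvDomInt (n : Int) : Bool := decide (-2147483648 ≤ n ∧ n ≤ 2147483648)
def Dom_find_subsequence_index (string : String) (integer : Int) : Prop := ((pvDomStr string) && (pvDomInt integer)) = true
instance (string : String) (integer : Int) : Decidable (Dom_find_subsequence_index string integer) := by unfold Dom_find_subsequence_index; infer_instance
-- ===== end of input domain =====

-- B replaces A's per-character scan with a pattern-driven jump search via str.find; same return value.


-- ===== PORT A =====
-- A's for-loop over range(len(string)) with state subsequence_index and early returns,
-- as structural recursion over the string's characters with the running index i.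
def aLoop (pat : List Char) : List Char → Nat → Nat → Int
  | [], _, _ => -1
  | c :: rest, i, k =>
    if c = pat.getD k ' ' then
      if k + 1 = pat.length then (i : Int) - ((k : Int) + 1) + 1
      else aLoop pat rest (i + 1) (k + 1)
    else aLoop pat rest (i + 1) k

def find_subsequence_index (string : String) (integer : Int) : Int :=
  let subsequence := PySem.List.sorted (PySem.Int.toChars integer) (fun c => c) false
  aLoop subsequence string.toList 0 0

-- ===== PORT B =====
-- B's for-loop over the pattern with state (pos, last); string.find(ch, pos) is PySem.Chars.findFrom.
def bLoop (s : List Char) (n : Nat) : List Char → Int → Int → Int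
  | [], _, last => last - (n : Int) + 1
  | c :: rest, pos, last =>
    let idx := PySem.Chars.findFrom s [c] pos none
    if idx = -1 then -1 else bLoop s n rest (idx + 1) idx

def find_subsequence_index_alt (string : String) (integer : Int) : Int :=
  let pattern := PySem.List.sorted (PySem.Int.toChars integer) (fun c => c) false
  bLoop string.toList pattern.length pattern 0 (-1)

-- ===== PRECONDITION & SPEC =====
def Spec_find_subsequence_index (string : String) (integer : Int) (out : Int) : Prop := out = find_subsequence_index_alt string integer
instance (string : String) (integer : Int) (out : Int) : Decidable (Spec_find_subsequence_index string integer out) := by unfold Spec_find_subsequence_index; infer_instance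

-- ===== CLAIM (what is proved, stated in full; the proofs are below) =====
def Claim_equal_find_subsequence_index : Prop := ∀ (string : String) (integer : Int), Dom_find_subsequence_index string integer → Spec_find_subsequence_index string integer (find_subsequence_index string integer)

-- ===== LEMMAS AND PROOFS =====

-- str.find with a single-character needle is first-index search (idxOf?).
theorem find_go_singleton (c : Char) : ∀ (t : List Char) (k : Nat),
    PySem.Chars.find.go [c] t k =
      (match t.idxOf? c with | none => -1 | some j => ((k + j : Nat) : Int))
  | [], k => by simp [PySem.Chars.find.go, List.idxOf?]
  | a :: t, k => by
    by_cases h : a = c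
    · subst h
      simp [PySem.Chars.find.go, List.isPrefixOf, List.idxOf?, List.findIdx?_cons]
    · have hb : (a == c) = false := by simp [h]
      have hpref : List.isPrefixOf [c] (a :: t) = false := by
        simp [List.isPrefixOf]
        exact fun e => h e.symm
      have hcons : (a :: t).idxOf? c = (t.idxOf? c).map (· + 1) := by
        simp [List.idxOf?, List.findIdx?_cons, hb]
      rw [PySem.Chars.find.go, hpref]
      simp only [Bool.false_eq_true, if_false]
      rw [find_go_singleton c t (k + 1), hcons]
      cases t.idxOf? c with
      | none => rfl
      | some j => simp only [Option.map_some]; show ((k + 1 + j : Nat) : Int) = ((k + (j + 1) : Nat) : Int); omega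

theorem find_singleton (c : Char) (t : List Char) :
    PySem.Chars.find t [c] =
      (match t.idxOf? c with | none => -1 | some j => ((j : Nat) : Int)) := by
  rw [PySem.Chars.find, find_go_singleton]
  cases t.idxOf? c <;> simp

theorem findFrom_singleton (s : List Char) (c : Char) (i : Nat) (hi : i ≤ s.length) :
    PySem.Chars.findFrom s [c] (i : Int) none =
      (match (s.drop i).idxOf? c with | none => -1 | some j => ((i + j : Nat) : Int)) := by
  rw [PySem.Chars.findFrom_natCast s [c] i hi, find_singleton]
  cases (s.drop i).idxOf? c with
  | none => simp
  | some j => simp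

-- A's scan returns -1 once the current pattern character never occurs in the rest.
theorem aLoop_none (pat : List Char) (c : Char) :
    ∀ (t : List Char) (i k : Nat), pat.getD k ' ' = c → c ∉ t → aLoop pat t i k = -1
  | [], _, _, _, _ => rfl
  | a :: t, i, k, hk, hmem => by
    have ha : a ≠ c := fun e => hmem (e ▸ List.mem_cons_self)
    rw [aLoop, if_neg (by rw [hk]; exact ha)]
    exact aLoop_none pat c t (i + 1) k hk (fun h => hmem (List.mem_cons_of_mem a h))

-- A's scan jumps to the first occurrence of the current pattern character.
theorem aLoop_step (pat : List Char) (c : Char) :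
    ∀ (t : List Char) (j : Nat) (i k : Nat), pat.getD k ' ' = c → t.idxOf? c = some j →
      aLoop pat t i k =
        if k + 1 = pat.length then ((i + j : Nat) : Int) - ((k : Int) + 1) + 1
        else aLoop pat (t.drop (j + 1)) (i + j + 1) (k + 1)
  | [], j, i, k, hk, hidx => by simp [List.idxOf?] at hidx
  | a :: t, j, i, k, hk, hidx => by
    by_cases h : a = c
    · have h0 : (a :: t).idxOf? c = some 0 := by
        simp [List.idxOf?, List.findIdx?_cons, h]
      have hj : j = 0 := by rw [h0] at hidx; exact (Option.some.inj hidx).symm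
      subst hj
      rw [aLoop, if_pos (by rw [hk]; exact h)]
      simp
    · have hb : (a == c) = false := by simp [h]
      have hcons : (a :: t).idxOf? c = (t.idxOf? c).map (· + 1) := by
        simp [List.idxOf?, List.findIdx?_cons, hb]
      rw [hcons] at hidx
      cases ht : t.idxOf? c with
      | none => rw [ht] at hidx; simp at hidx
      | some m =>
        rw [ht] at hidx
        simp only [Option.map_some] at hidx
        have hjm : j = m + 1 := (Option.some.inj hidx).symm
        subst hjm
        rw [aLoop, if_neg (by rw [hk]; exact h)]
        rw [aLoop_step pat c t m (i + 1) k hk ht]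
        have e2 : i + 1 + m + 1 = i + (m + 1) + 1 := by omega
        rw [e2]
        have e1 : ((i + 1 + m : Nat) : Int) = ((i + (m + 1) : Nat) : Int) := by omega
        rw [e1, List.drop_succ_cons]
-- Main loop correspondence: A's scan from position i with pattern index k equals
-- B's jump search over the remaining pattern characters.
theorem loop_eq (s pat : List Char) :
    ∀ (rem : List Char) (k i : Nat) (last : Int), rem = pat.drop k → rem ≠ [] → i ≤ s.length →
      aLoop pat (s.drop i) i k = bLoop s pat.length rem (i : Int) last
  | [], _, _, _, _, hne, _ => absurd rfl hne
  | c :: rs, k, i, last, hrem, _, hi => by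
    have hklt : k < pat.length := by
      by_contra h
      rw [List.drop_eq_nil_of_le (by omega)] at hrem
      exact (List.cons_ne_nil c rs) hrem
    have h1 : pat[k]? = some c := by
      rw [← List.head?_drop, ← hrem]
      rfl
    have hgetk : pat.getD k ' ' = c := by
      rw [List.getD_eq_getElem?_getD, h1]
      rfl
    have hrs : rs = pat.drop (k + 1) := by
      rw [← List.tail_drop, ← hrem]
      rfl
    rw [bLoop]
    rw [findFrom_singleton s c i hi]
    cases hidx : (s.drop i).idxOf? c with
    | none =>
      rw [aLoop_none pat c (s.drop i) i k hgetk (List.idxOf?_eq_none_iff.mp hidx)]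
      simp
    | some j =>
      have hjlt : j < (s.drop i).length := by
        obtain ⟨h, _, _⟩ := List.idxOf?_eq_some_iff.mp hidx
        exact h
      have hij : i + j + 1 ≤ s.length := by
        have h2 := hjlt
        simp only [List.length_drop] at h2
        omega
      simp only []
      have hne1 : ((i + j : Nat) : Int) ≠ -1 := by push_cast; omega
      rw [if_neg hne1]
      rw [aLoop_step pat c (s.drop i) j i k hgetk hidx]
      by_cases hend : k + 1 = pat.length
      · rw [if_pos hend]
        have : rs = [] := by rw [hrs, hend, List.drop_length]
        rw [this, bLoop]
        rw [← hend]
        push_cast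
        ring
      · rw [if_neg hend]
        have hrne : rs ≠ [] := by
          rw [hrs]
          intro h
          have := List.drop_eq_nil_iff.mp h
          omega
        have hdd : (List.drop i s).drop (j + 1) = List.drop (i + j + 1) s := by
          rw [List.drop_drop]
          congr 1
        rw [hdd, loop_eq s pat rs (k + 1) (i + j + 1) ((i + j : Nat) : Int) hrs hrne hij]
        norm_cast

theorem toDigitsCore_ne_nil (b : Nat) : ∀ (fuel n : Nat) (ds : List Char), fuel ≠ 0 ∨ ds ≠ [] → Nat.toDigitsCore b fuel n ds ≠ []
  | 0, _, ds, h => by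
    rw [Nat.toDigitsCore]
    exact h.resolve_left (fun h0 => h0 rfl)
  | fuel + 1, n, ds, _ => by
    rw [Nat.toDigitsCore]
    split
    · exact List.cons_ne_nil _ _
    · exact toDigitsCore_ne_nil b fuel _ _ (Or.inr (List.cons_ne_nil _ _))

theorem toChars_ne_nil (n : Int) : PySem.Int.toChars n ≠ [] := by
  rw [PySem.Int.toChars]
  split
  · exact List.cons_ne_nil _ _
  · exact toDigitsCore_ne_nil 10 _ _ [] (Or.inl (by omega))

-- ===== VERDICT (by name: the statement is the Claim_ definition above) =====
theorem find_subsequence_index_spec : Claim_equal_find_subsequence_index := by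
  intro string integer _
  unfold Spec_find_subsequence_index find_subsequence_index find_subsequence_index_alt
  simp only []
  set pat := PySem.List.sorted (PySem.Int.toChars integer) (fun c => c) false with hpat
  have hne : pat ≠ [] := by
    rw [hpat, Ne, PySem.List.sorted_eq_nil_iff]
    exact toChars_ne_nil integer
  have := loop_eq string.toList pat pat 0 0 (-1) (by rw [List.drop_zero]) hne (Nat.zero_le _)
  rw [List.drop_zero] at this
  exact_mod_cast this
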